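-- pv_equiv track=rewrite | github.com/Fondamenti18/fondamenti-di-programmazione | students/1812793/homework05/program01.py | trova_prox
-- ===== SOURCE A (Python) =====
-- def trova_prox(c20,c):
--     #n=len(c)
--     a=False
--     for i in c20:
--         f=False
--         #for j in range(22,n):
--         if i in c[0]:
--             f=True
--             #break
--         if a==True and f==False:
--             return i
--         a=f
-- ===== SOURCE B (Python) =====
-- def trova_prox(c20, c):
--     l = list(c20)
--     s = ''.join('1' if x in c[0] else '0' for x in l)
--     i = s.find('10')
--     if i != -1:
--         return l[i + 1]
-- ===== Notes on version B (the rewrite author's own statement) =====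
-- stated objective: alternative
-- what changed: B encodes membership of each c20 element in c[0] as a '1'/'0' bit-string and locates the transition by substring search s.find('10'), replacing A's running-flag element-by-element scan; the answer is the list element at index find+1.
import Mathlib
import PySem

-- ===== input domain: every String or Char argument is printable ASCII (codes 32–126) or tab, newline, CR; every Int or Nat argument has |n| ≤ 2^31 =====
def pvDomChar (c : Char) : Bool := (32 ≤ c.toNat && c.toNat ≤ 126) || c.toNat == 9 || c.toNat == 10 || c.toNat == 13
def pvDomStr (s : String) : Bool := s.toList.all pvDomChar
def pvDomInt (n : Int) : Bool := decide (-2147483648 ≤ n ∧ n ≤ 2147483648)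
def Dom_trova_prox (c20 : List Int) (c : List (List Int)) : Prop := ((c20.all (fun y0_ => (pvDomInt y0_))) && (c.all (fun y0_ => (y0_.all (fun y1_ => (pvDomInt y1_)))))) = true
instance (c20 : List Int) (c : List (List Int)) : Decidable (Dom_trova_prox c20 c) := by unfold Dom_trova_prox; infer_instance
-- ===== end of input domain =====

-- B encodes membership in c[0] as a '1'/'0' bit-string and finds the transition by substring search for "10" (alternative algorithm, same cost).

-- ===== PORT A =====
-- the loop 'for i in c20' with running flag a; c0 is c[0] (Pre_ guarantees it exists whenever the loop body runs)
def trovaProxLoopA (c0 : List Int) : Bool → List Int → Option Int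
  | _, [] => none
  | a, i :: rest =>
    let f := c0.contains i
    if a && !f then some i else trovaProxLoopA c0 f rest

def trova_prox (c20 : List Int) (c : List (List Int)) : Option Int :=
  trovaProxLoopA (c.headD []) false c20

-- ===== PORT B =====
-- s = ''.join('1' if x in c[0] else '0' for x in l);  i = s.find('10');  return l[i+1] if i != -1
def trova_prox_alt (c20 : List Int) (c : List (List Int)) : Option Int :=
  let l := c20
  let s := String.ofList (l.map (fun x => if (c.headD []).contains x then '1' else '0'))
  let i := PySem.Str.find s "10"
  if i ≠ -1 then PySem.List.pyGet? l (i + 1) else none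

-- ===== PRECONDITION & SPEC =====
-- Pre_ excludes exactly the inputs where Python's c[0] raises IndexError: c empty while c20 nonempty (both A and B raise there).
def Pre_trova_prox (c20 : List Int) (c : List (List Int)) : Prop := c20 = [] ∨ c ≠ []
instance (c20 : List Int) (c : List (List Int)) : Decidable (Pre_trova_prox c20 c) := by unfold Pre_trova_prox; infer_instance
def pvWitness_trova_prox : List Int × List (List Int) := ([1, 2], [[1]])

def Spec_trova_prox (c20 : List Int) (c : List (List Int)) (out : Option Int) : Prop := out = trova_prox_alt c20 c
instance (c20 : List Int) (c : List (List Int)) (out : Option Int) : Decidable (Spec_trova_prox c20 c out) := by unfold Spec_trova_prox; infer_instance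

-- ===== CLAIM (what is proved, stated in full; the proofs are below) =====
def Claim_equal_trova_prox : Prop := ∀ (c20 : List Int) (c : List (List Int)), Dom_trova_prox c20 c → Pre_trova_prox c20 c → Spec_trova_prox c20 c (trova_prox c20 c)

-- ===== LEMMAS AND PROOFS =====

-- if the pattern is a prefix, find returns 0
theorem find_eq_zero_of_prefix (s sub : List Char) (h : sub <+: s) :
    PySem.Chars.find s sub = 0 := by
  have h0 : 0 ≤ PySem.Chars.find s sub :=
    (PySem.Chars.find_nonneg_iff s sub).2 h.isInfix
  obtain ⟨-, hmin⟩ := PySem.Chars.find_spec (s := s) (sub := sub) h0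
  by_contra hne
  have hpos : 0 < (PySem.Chars.find s sub).toNat := by omega
  exact hmin 0 hpos (by simpa using h)

-- find shifts over a head that does not start an occurrence
theorem find_cons_shift (c : Char) (s sub : List Char) (h : ¬ sub <+: c :: s) :
    PySem.Chars.find (c :: s) sub =
      if PySem.Chars.find s sub = -1 then -1 else 1 + PySem.Chars.find s sub := by
  by_cases hnil : PySem.Chars.find s sub = -1
  · simp only [hnil, if_pos]
    rw [PySem.Chars.find_eq_neg_one_iff] at hnil ⊢
    intro hinf
    rcases List.infix_cons_iff.1 hinf with hp | hi
    · exact h hp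
    · exact hnil hi
  · simp only [hnil, if_neg, not_false_iff]
    have h0 : 0 ≤ PySem.Chars.find s sub := by
      have := PySem.Chars.neg_one_le_find s sub
      omega
    set k := (PySem.Chars.find s sub).toNat with hk
    obtain ⟨hocc, hmin⟩ := PySem.Chars.find_spec (s := s) (sub := sub) h0
    have hocc' : sub <+: (c :: s).drop (k + 1) := by
      simpa [List.drop_succ_cons] using hocc
    have hinf' : sub <:+: (c :: s) :=
      hocc'.isInfix.trans (List.drop_suffix (k + 1) (c :: s)).isInfix
    have h0' : 0 ≤ PySem.Chars.find (c :: s) sub :=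
      (PySem.Chars.find_nonneg_iff _ sub).2 hinf'
    obtain ⟨hocc2, hmin2⟩ := PySem.Chars.find_spec (s := c :: s) (sub := sub) h0'
    set j := (PySem.Chars.find (c :: s) sub).toNat with hj
    -- j ≤ k+1 by minimality of j against the occurrence at k+1
    have hjle : j ≤ k + 1 := by
      by_contra hgt
      exact hmin2 (k + 1) (by omega) hocc'
    -- j ≠ 0 because sub is not a prefix of c :: s
    have hj0 : j ≠ 0 := by
      intro h0''
      apply h
      simpa [h0''] using hocc2
    -- k ≤ j - 1 by minimality of k against the occurrence at j - 1 in s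
    have hocc2' : sub <+: s.drop (j - 1) := by
      have hdrop : (c :: s).drop j = s.drop (j - 1) := by
        rw [show j = (j - 1) + 1 from by omega, List.drop_succ_cons]
        congr 1
      rwa [hdrop] at hocc2
    have hkle : k ≤ j - 1 := by
      by_contra hgt
      exact hmin (j - 1) (by omega) hocc2'
    have hjk : j = k + 1 := by omega
    omega


-- A's flag loop equals a "10"-search over the mask with the flag's bit prepended
theorem loopA_eq_find (c0 : List Int) (l : List Int) (b : Bool) :
    trovaProxLoopA c0 b l =
      (let m := (if b then '1' else '0') ::
          l.map (fun x => if c0.contains x then '1' else '0');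
       if PySem.Chars.find m ['1', '0'] = -1 then none
       else l[(PySem.Chars.find m ['1', '0']).toNat]?) := by
  induction l generalizing b with
  | nil =>
    have hne : PySem.Chars.find [(if b then '1' else '0')] ['1', '0'] = -1 := by
      rw [PySem.Chars.find_eq_neg_one_iff]
      intro hinf
      have := hinf.length_le
      simp at this
    simp [trovaProxLoopA, hne]
  | cons x xs ih =>
    simp only [trovaProxLoopA, List.map_cons]
    set m' := (if c0.contains x then '1' else '0') ::
        xs.map (fun y => if c0.contains y then '1' else '0') with hm'
    by_cases hbf : b && !(c0.contains x)
    · obtain ⟨hb, hf⟩ : b = true ∧ c0.contains x = false := by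
        cases b <;> cases h : c0.contains x <;> simp_all
      have hpre : (['1', '0'] : List Char) <+: ((if b then '1' else '0') :: m') := by
        rw [hm', hb, hf]
        simp
      rw [if_pos hbf, find_eq_zero_of_prefix _ _ hpre]
      norm_num
    · have hnp : ¬ (['1', '0'] : List Char) <+: ((if b then '1' else '0') :: m') := by
        intro hpre
        have h1 := (List.cons_prefix_cons.1 hpre).1
        have h2 := (List.cons_prefix_cons.1 (List.cons_prefix_cons.1 hpre).2).1
        cases b <;> cases h : c0.contains x <;> simp_all
      rw [if_neg hbf, ih (c0.contains x)]
      simp only [← hm']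
      rw [find_cons_shift _ _ _ hnp]
      by_cases hm1 : PySem.Chars.find m' ['1', '0'] = -1
      · rw [if_pos hm1, if_pos hm1]
        norm_num
      · have h0 : 0 ≤ PySem.Chars.find m' ['1', '0'] := by
          have := PySem.Chars.neg_one_le_find m' ['1', '0']
          omega
        have hne2 : ¬ (1 + PySem.Chars.find m' ['1', '0'] = -1) := by omega
        rw [if_neg hm1, if_neg hm1, if_neg hne2]
        have htn : (1 + PySem.Chars.find m' ['1', '0']).toNat =
            (PySem.Chars.find m' ['1', '0']).toNat + 1 := by omega
        rw [htn, List.getElem?_cons_succ]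

-- ===== VERDICT (by name: the statement is the Claim_ definition above) =====
theorem trova_prox_spec : Claim_equal_trova_prox := by
  intro c20 c _ _
  unfold Spec_trova_prox trova_prox trova_prox_alt
  rw [loopA_eq_find]
  simp only [Bool.false_eq_true, if_false, PySem.Str.find_eq, String.toList_ofList]
  set m := c20.map (fun x => if (c.headD []).contains x then '1' else '0') with hm
  have h10 : ("10" : String).toList = ['1', '0'] := rfl
  have hnp : ¬ (("10" : String).toList) <+: ('0' :: m) := by
    rw [h10]
    intro hpre
    have h1 := (List.cons_prefix_cons.1 hpre).1
    simp at h1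
  have hshift := find_cons_shift '0' m (("10" : String).toList) hnp
  rw [h10] at hshift
  rw [hshift]
  by_cases hm1 : PySem.Chars.find m ['1', '0'] = -1
  · simp [hm1]
  · have h0 : 0 ≤ PySem.Chars.find m ['1', '0'] := by
      have := PySem.Chars.neg_one_le_find m ['1', '0']
      omega
    have hne2 : ¬ (1 + PySem.Chars.find m ['1', '0'] = -1) := by omega
    have htn : (1 + PySem.Chars.find m ['1', '0']).toNat =
        (PySem.Chars.find m ['1', '0']).toNat + 1 := by omega
    have hkcast : PySem.Chars.find m ['1', '0'] + 1 =
        (((PySem.Chars.find m ['1', '0']).toNat + 1 : Nat) : Int) := by omega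
    rw [if_neg hm1, if_neg hne2, h10, if_pos hm1, htn, hkcast, PySem.List.pyGet?_natCast]
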